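-- pv_equiv track=rewrite | github.com/Kunalpod/codewars | spelling_bee.py | how_many_bees
-- ===== SOURCE A (Python) =====
-- def how_many_bees(hive):
--     if not hive: return 0
--     count = 0
--     for i in range(len(hive)):
--         for j in range(len(hive[i])):
--             try:
--                 if hive[i][j]=='b' and hive[i][j+1]=='e' and hive[i][j+2]=='e': count += 1
--             except:    pass
--             try:
--                 if j-2>=0 and hive[i][j]=='b' and hive[i][j-1]=='e' and hive[i][j-2]=='e': count += 1
--             except:    pass
--             try:
--                 if hive[i][j]=='b' and hive[i+1][j]=='e' and hive[i+2][j]=='e': count += 1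
--             except:    pass
--             try:
--                 if i-2>=0 and hive[i][j]=='b' and hive[i-1][j]=='e' and hive[i-2][j]=='e': count += 1
--             except:    pass
--     return count
-- ===== SOURCE B (Python) =====
-- def how_many_bees(hive):
--     # Row/column decomposition: scan each row for 'bee'/'eeb' triples, then
--     # rebuild each column as contiguous segments (broken where a row is too
--     # short) and scan those, instead of probing four directions per cell.
--     if not hive:
--         return 0
--
--     def bees(seq):
--         n = 0
--         for a, b, c in zip(seq, seq[1:], seq[2:]):
--             if a == 'b' and b == 'e' and c == 'e':
--                 n += 1
--             if a == 'e' and b == 'e' and c == 'b':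
--                 n += 1
--         return n
--
--     total = sum(bees(row) for row in hive)
--     width = max(len(row) for row in hive)
--     for j in range(width):
--         seg = []
--         for row in hive:
--             if j < len(row):
--                 seg.append(row[j])
--             else:
--                 total += bees(seg)
--                 seg = []
--         total += bees(seg)
--     return total
-- ===== Notes on version B (the rewrite author's own statement) =====
-- stated objective: alternative
-- what changed: A probes four directions (with try/except index guards) at every cell; B instead scans each row once for 'bee'/'eeb' triples and then rebuilds each column as contiguous segments (broken where a row is too short) and scans those, so all exception-driven per-cell index arithmetic disappears.
import Mathlib
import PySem

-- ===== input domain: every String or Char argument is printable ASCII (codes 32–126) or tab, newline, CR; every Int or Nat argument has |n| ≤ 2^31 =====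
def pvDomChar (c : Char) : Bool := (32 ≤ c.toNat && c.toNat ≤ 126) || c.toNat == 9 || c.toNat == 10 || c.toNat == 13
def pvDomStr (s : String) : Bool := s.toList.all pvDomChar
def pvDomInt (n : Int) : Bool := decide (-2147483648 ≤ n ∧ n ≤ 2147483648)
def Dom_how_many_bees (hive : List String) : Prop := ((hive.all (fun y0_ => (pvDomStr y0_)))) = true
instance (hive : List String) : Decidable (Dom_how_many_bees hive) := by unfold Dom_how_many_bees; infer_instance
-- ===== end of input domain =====

-- B replaces A's four directional probes per cell (with try/except) by one triple scan per
-- row plus one triple scan per reconstructed column segment; objective: alternative.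

-- ===== PORT A =====
-- hive[a][b] under try/except: any IndexError is swallowed, so each guarded check
-- contributes 1 exactly when every index it evaluates is in range and the chars match;
-- all indices are nonnegative, so getElem? is exact here.
def pvG (rows : List (List Char)) (i j : Nat) : Option Char := (rows[i]?).bind (fun r => r[j]?)

def how_many_bees (hive : List String) : Int :=
  if hive = [] then 0
  else
    let rows := hive.map String.toList
    (List.range hive.length).foldl (fun count i =>
      (List.range (rows.getD i []).length).foldl (fun count j =>
        let count := if pvG rows i j = some 'b' ∧ pvG rows i (j+1) = some 'e' ∧ pvG rows i (j+2) = some 'e' then count + 1 else count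
        let count := if 2 ≤ j ∧ pvG rows i j = some 'b' ∧ pvG rows i (j-1) = some 'e' ∧ pvG rows i (j-2) = some 'e' then count + 1 else count
        let count := if pvG rows i j = some 'b' ∧ pvG rows (i+1) j = some 'e' ∧ pvG rows (i+2) j = some 'e' then count + 1 else count
        if 2 ≤ i ∧ pvG rows i j = some 'b' ∧ pvG rows (i-1) j = some 'e' ∧ pvG rows (i-2) j = some 'e' then count + 1 else count
      ) count) 0

-- ===== PORT B =====
-- bees(seq): the loop over zip(seq, seq[1:], seq[2:]) counting 'bee' and 'eeb' triples
def pvBees (s : List Char) : Int :=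
  (s.zip ((s.drop 1).zip (s.drop 2))).foldl (fun n t =>
    let n := if t.1 = 'b' ∧ t.2.1 = 'e' ∧ t.2.2 = 'e' then n + 1 else n
    if t.1 = 'e' ∧ t.2.1 = 'e' ∧ t.2.2 = 'b' then n + 1 else n) 0

def how_many_bees_alt (hive : List String) : Int :=
  if hive = [] then 0
  else
    let rows := hive.map String.toList
    let total := (rows.map pvBees).sum
    -- max(len(row) for row in hive): hive is nonempty and lengths are ≥ 0, so folding from 0 is exact
    let width := (rows.map List.length).foldl max 0
    (List.range width).foldl (fun total j =>
      let p := rows.foldl (fun (p : Int × List Char) r =>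
        if j < r.length then (p.1, p.2 ++ [r.getD j ' '])   -- r[j]; in range here, so getD is exact
        else (p.1 + pvBees p.2, [])) (total, [])
      p.1 + pvBees p.2) total

-- ===== PRECONDITION & SPEC =====
def Spec_how_many_bees (hive : List String) (out : Int) : Prop := out = how_many_bees_alt hive
instance (hive : List String) (out : Int) : Decidable (Spec_how_many_bees hive out) := by unfold Spec_how_many_bees; infer_instance

-- ===== CLAIM (what is proved, stated in full; the proofs are below) =====
def Claim_equal_how_many_bees : Prop := ∀ (hive : List String), Dom_how_many_bees hive → Spec_how_many_bees hive (how_many_bees hive)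

-- ===== LEMMAS AND PROOFS =====

-- the triple indicator
def pvInd3 (a b c : Char) : Int :=
  (if a = 'b' ∧ b = 'e' ∧ c = 'e' then 1 else 0) + (if a = 'e' ∧ b = 'e' ∧ c = 'b' then 1 else 0)

-- a column with holes: entry i is some char when row i is long enough, none otherwise
def pvOget : List (Option Char) → Nat → Option Char
  | [], _ => none
  | o :: _, 0 => o
  | _ :: t, k+1 => pvOget t k

def pvFwd (c : List (Option Char)) (k : Nat) : Int :=
  if pvOget c k = some 'b' ∧ pvOget c (k+1) = some 'e' ∧ pvOget c (k+2) = some 'e' then 1 else 0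
def pvBwd (c : List (Option Char)) (i : Nat) : Int :=
  if 2 ≤ i ∧ pvOget c i = some 'b' ∧ pvOget c (i-1) = some 'e' ∧ pvOget c (i-2) = some 'e' then 1 else 0
def pvEeb (c : List (Option Char)) (k : Nat) : Int :=
  if pvOget c k = some 'e' ∧ pvOget c (k+1) = some 'e' ∧ pvOget c (k+2) = some 'b' then 1 else 0

def pvGc (c : List (Option Char)) (i : Nat) : Int := pvFwd c i + pvBwd c i
def pvFo (c : List (Option Char)) (k : Nat) : Int := pvFwd c k + pvEeb c k

-- counting 'bee'/'eeb' runs over an option stream, by recursion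
def pvBeesO : List (Option Char) → Int
  | some a :: some b :: some c :: t => pvInd3 a b c + pvBeesO (some b :: some c :: t)
  | _ :: t => pvBeesO t
  | [] => 0

def pvHd : List (Option Char) → Int
  | some a :: some b :: some c :: _ => pvInd3 a b c
  | _ => 0

-- spec of B's per-column segment loop
def pvSegSpec : List Char → List (Option Char) → Int
  | seg, [] => pvBees seg
  | seg, some x :: c => pvSegSpec (seg ++ [x]) c
  | seg, none :: c => pvBees seg + pvSegSpec [] c

def pvCol (rows : List (List Char)) (j : Nat) : List (Option Char) :=
  rows.map (fun r => if j < r.length then some (r.getD j ' ') else none)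

def pvCell (rows : List (List Char)) (i j : Nat) : Int :=
  (if pvG rows i j = some 'b' ∧ pvG rows i (j+1) = some 'e' ∧ pvG rows i (j+2) = some 'e' then 1 else 0)
  + (if 2 ≤ j ∧ pvG rows i j = some 'b' ∧ pvG rows i (j-1) = some 'e' ∧ pvG rows i (j-2) = some 'e' then 1 else 0)
  + (if pvG rows i j = some 'b' ∧ pvG rows (i+1) j = some 'e' ∧ pvG rows (i+2) j = some 'e' then 1 else 0)
  + (if 2 ≤ i ∧ pvG rows i j = some 'b' ∧ pvG rows (i-1) j = some 'e' ∧ pvG rows (i-2) j = some 'e' then 1 else 0)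

-- A's inner loop body: the four try/except probes add pvCell
lemma pv_body_eq (rows : List (List Char)) (i : Nat) :
    (fun (count : Int) (j : Nat) =>
        let count := if pvG rows i j = some 'b' ∧ pvG rows i (j+1) = some 'e' ∧ pvG rows i (j+2) = some 'e' then count + 1 else count
        let count := if 2 ≤ j ∧ pvG rows i j = some 'b' ∧ pvG rows i (j-1) = some 'e' ∧ pvG rows i (j-2) = some 'e' then count + 1 else count
        let count := if pvG rows i j = some 'b' ∧ pvG rows (i+1) j = some 'e' ∧ pvG rows (i+2) j = some 'e' then count + 1 else count
        if 2 ≤ i ∧ pvG rows i j = some 'b' ∧ pvG rows (i-1) j = some 'e' ∧ pvG rows (i-2) j = some 'e' then count + 1 else count)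
      = fun count j => count + pvCell rows i j := by
  funext count j
  simp only [pvCell]
  split_ifs <;> ring

-- generic fold shape
lemma pv_foldl_add {β : Type} (l : List β) (f : β → Int) (n : Int) :
    l.foldl (fun a x => a + f x) n = n + (l.map f).sum := by
  induction l generalizing n with
  | nil => simp
  | cons x t ih => simp [List.foldl_cons, ih]; ring

lemma pv_sum_shift (f : Nat → Int) (n : Nat) :
    ((List.range (n+1)).map f).sum = f 0 + ((List.range n).map (fun k => f (k+1))).sum := by
  rw [List.range_succ_eq_map]
  simp [List.map_map, Function.comp_def, Nat.succ_eq_add_one]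

lemma pvOget_eq (cs : List (Option Char)) (k : Nat) : pvOget cs k = (cs[k]?).bind id := by
  induction cs generalizing k with
  | nil => simp [pvOget]
  | cons o t ih => cases k with
    | zero => simp [pvOget]
    | succ m => simp [pvOget, ih]

lemma pvFo_shift (o : Option Char) (t : List (Option Char)) (k : Nat) :
    pvFo (o :: t) (k+1) = pvFo t k := by
  simp only [pvFo, pvFwd, pvEeb,
    show pvOget (o :: t) (k+1) = pvOget t k from rfl,
    show pvOget (o :: t) (k+1+1) = pvOget t (k+1) from rfl,
    show pvOget (o :: t) (k+1+2) = pvOget t (k+2) from rfl]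

lemma pvBeesO_cons (o : Option Char) (c : List (Option Char)) :
    pvBeesO (o :: c) = pvHd (o :: c) + pvBeesO c := by
  cases o with
  | none => simp [pvBeesO, pvHd]
  | some a =>
    cases c with
    | nil => simp [pvBeesO, pvHd]
    | cons o2 c2 =>
      cases o2 with
      | none => simp [pvBeesO, pvHd]
      | some b =>
        cases c2 with
        | nil => simp [pvBeesO, pvHd]
        | cons o3 c3 =>
          cases o3 with
          | none => simp [pvBeesO, pvHd]
          | some d => simp [pvBeesO, pvHd]

lemma pvHd_eq_Fo0 (c : List (Option Char)) : pvHd c = pvFo c 0 := by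
  rcases c with _ | ⟨_ | a, _ | ⟨_ | b, _ | ⟨_ | d, t⟩⟩⟩ <;>
    simp [pvHd, pvFo, pvFwd, pvEeb, pvInd3, pvOget]

-- Σ_{k<|c|} Fo c k = pvBeesO c
lemma pv_sum_Fo (c : List (Option Char)) :
    ((List.range c.length).map (pvFo c)).sum = pvBeesO c := by
  induction c with
  | nil => simp [pvBeesO]
  | cons o t ih =>
    rw [List.length_cons, pv_sum_shift, pvBeesO_cons, pvHd_eq_Fo0,
      List.map_congr_left (fun k _ => pvFo_shift o t k), ih]

-- reindexing the backward probes: Σ bwd = Σ eeb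
lemma pvBwd_shift (cs : List (Option Char)) (k : Nat) : pvBwd cs (2+k) = pvEeb cs k := by
  have e3 : (2:Nat)+k = k+2 := by omega
  have hg : (2:Nat) ≤ k+2 := by omega
  simp only [pvBwd, pvEeb, e3, hg, true_and]
  exact if_congr (by tauto) rfl rfl

lemma pvEeb_zero_of_le (cs : List (Option Char)) (k : Nat) (h : cs.length ≤ k+2) :
    pvEeb cs k = 0 := by
  have : pvOget cs (k+2) = none := by
    rw [pvOget_eq, List.getElem?_eq_none h]
    rfl
  simp [pvEeb, this]

lemma pv_sum_G_eq_sum_Fo (c : List (Option Char)) :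
    ((List.range c.length).map (pvGc c)).sum = ((List.range c.length).map (pvFo c)).sum := by
  rw [show pvGc c = fun i => pvBwd c i + pvFwd c i by funext i; simp [pvGc]; ring,
      show pvFo c = fun k => pvEeb c k + pvFwd c k by funext k; simp [pvFo]; ring,
      PySem.List.sum_map_add_int, PySem.List.sum_map_add_int]
  congr 1
  -- Σ bwd = Σ eeb over range (length c)
  rcases hL : c.length with _ | L
  · simp
  rcases L with _ | m
  · simp [pvBwd, pvEeb_zero_of_le c 0 (by omega)]
  · -- length m+2
    have h1 : m+1+1 = 2+m := by omega
    have h2 : m+1+1 = m+2 := by omega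
    conv_lhs => rw [h1, List.range_add]
    conv_rhs => rw [h2, List.range_add]
    simp only [List.map_append, List.sum_append, List.map_map]
    have hb01 : ((List.range 2).map (pvBwd c)).sum = 0 := by
      simp [List.range_succ, pvBwd]
    have het : ((List.range 2).map (fun x => pvEeb c (m + x))).sum = 0 := by
      simp [List.range_succ, pvEeb_zero_of_le c m (by omega),
        pvEeb_zero_of_le c (m+1) (by omega)]
    simp only [Function.comp_def]
    rw [hb01, het,
      List.map_congr_left (g := pvEeb c) (fun k _ => pvBwd_shift c k)]
    simp

lemma pv_sum_G (c : List (Option Char)) :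
    ((List.range c.length).map (pvGc c)).sum = pvBeesO c := by
  rw [pv_sum_G_eq_sum_Fo, pv_sum_Fo]

-- B's bees: fold = sum of triple indicators, and its recursion
lemma pvBees_eq_sum (s : List Char) :
    pvBees s = ((s.zip ((s.drop 1).zip (s.drop 2))).map (fun t => pvInd3 t.1 t.2.1 t.2.2)).sum := by
  unfold pvBees
  rw [show (fun (n : Int) (t : Char × Char × Char) =>
      let n := if t.1 = 'b' ∧ t.2.1 = 'e' ∧ t.2.2 = 'e' then n + 1 else n
      if t.1 = 'e' ∧ t.2.1 = 'e' ∧ t.2.2 = 'b' then n + 1 else n)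
      = (fun n t => n + pvInd3 t.1 t.2.1 t.2.2) by
        funext n t; simp only [pvInd3]; split_ifs <;> ring]
  rw [pv_foldl_add, zero_add]

lemma pvBees_cons3 (a b c : Char) (t : List Char) :
    pvBees (a :: b :: c :: t) = pvInd3 a b c + pvBees (b :: c :: t) := by
  rw [pvBees_eq_sum, pvBees_eq_sum]
  simp [List.zip_cons_cons]

lemma pvBeesO_map_some (s : List Char) : pvBeesO (s.map some) = pvBees s := by
  induction s with
  | nil => simp [pvBeesO, pvBees]
  | cons a t ih =>
    rw [List.map_cons, pvBeesO_cons, ih]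
    rcases t with _ | ⟨b, _ | ⟨c, u⟩⟩
    · show pvHd [some a] + pvBees [a] = pvBees [a]
      simp [pvHd, pvBees]
    · show pvHd [some a, some b] + pvBees [a, b] = pvBees [a, b]
      simp [pvHd, pvBees]
    · rw [pvBees_cons3]
      rfl

lemma pvBeesO_append_none (s : List Char) (c : List (Option Char)) :
    pvBeesO (s.map some ++ none :: c) = pvBees s + pvBeesO c := by
  induction s with
  | nil =>
    rw [List.map_nil, List.nil_append, pvBeesO_cons]
    simp [pvHd, pvBees]
  | cons a t ih =>
    rw [List.map_cons, List.cons_append, pvBeesO_cons, ih]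
    have hhd : pvHd (some a :: (t.map some ++ none :: c)) = pvHd (some a :: t.map some) := by
      rcases t with _ | ⟨b, _ | ⟨d, u⟩⟩ <;> rfl
    rw [hhd, show pvBees (a :: t) = pvHd (some a :: t.map some) + pvBees t by
      rw [← pvBeesO_map_some (a :: t), List.map_cons, pvBeesO_cons, pvBeesO_map_some]]
    ring

lemma pvSegSpec_eq (seg : List Char) (c : List (Option Char)) :
    pvSegSpec seg c = pvBeesO (seg.map some ++ c) := by
  induction c generalizing seg with
  | nil => simp [pvSegSpec, pvBeesO_map_some]
  | cons o c' ih =>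
    cases o with
    | some x =>
      rw [show pvSegSpec seg (some x :: c') = pvSegSpec (seg ++ [x]) c' from rfl, ih]
      simp
    | none =>
      rw [show pvSegSpec seg (none :: c') = pvBees seg + pvSegSpec [] c' from rfl, ih]
      simp [pvBeesO_append_none]

-- B's per-column loop computes pvSegSpec
lemma pv_col_loop (rows : List (List Char)) (j : Nat) (t : Int) (seg : List Char) :
    (rows.foldl (fun (p : Int × List Char) r =>
        if j < r.length then (p.1, p.2 ++ [r.getD j ' '])
        else (p.1 + pvBees p.2, [])) (t, seg)).1
      + pvBees (rows.foldl (fun (p : Int × List Char) r =>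
        if j < r.length then (p.1, p.2 ++ [r.getD j ' '])
        else (p.1 + pvBees p.2, [])) (t, seg)).2 = t + pvSegSpec seg (pvCol rows j) := by
  induction rows generalizing t seg with
  | nil => simp [pvCol, pvSegSpec]
  | cons r rows' ih =>
    rw [show pvCol (r :: rows') j
        = (if j < r.length then some (r.getD j ' ') else none) :: pvCol rows' j from rfl]
    by_cases hr : j < r.length
    · simp only [List.foldl_cons, if_pos hr, ih]
      rfl
    · simp only [List.foldl_cons, if_neg hr, ih]
      rw [show pvSegSpec seg (none :: pvCol rows' j)
          = pvBees seg + pvSegSpec [] (pvCol rows' j) from rfl]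
      ring

-- column access = A's guarded double index
lemma pv_oget_col (rows : List (List Char)) (i j : Nat) :
    pvOget (pvCol rows j) i = pvG rows i j := by
  rw [pvOget_eq, pvCol, List.getElem?_map, pvG]
  cases h : rows[i]? with
  | none => rfl
  | some r =>
    simp only [Option.map_some, Option.bind_some]
    by_cases hj : j < r.length
    · simp [hj]
    · simp [hj]

lemma pv_oget_row (rows : List (List Char)) (i j : Nat) (h : i < rows.length) :
    pvOget ((rows.getD i []).map some) j = pvG rows i j := by
  rw [pvOget_eq, List.getElem?_map, pvG, List.getElem?_eq_getElem h,
    List.getD_eq_getElem rows [] h]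
  cases hc : (rows[i])[j]? <;> simp [hc]

-- the cell splits into a row probe and a column probe
lemma pvCell_split (rows : List (List Char)) (i j : Nat) (h : i < rows.length) :
    pvCell rows i j = pvGc ((rows.getD i []).map some) j + pvGc (pvCol rows j) i := by
  simp only [pvCell, pvGc, pvFwd, pvBwd, pv_oget_col, pv_oget_row rows i _ h]
  ring

-- zero extension of the j-range
lemma pv_sum_range_extend (f : Nat → Int) (m w : Nat) (hmw : m ≤ w)
    (h0 : ∀ k, m ≤ k → k < w → f k = 0) :
    ((List.range w).map f).sum = ((List.range m).map f).sum := by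
  rw [show w = m + (w - m) by omega, List.range_add, List.map_append, List.sum_append]
  have : ((List.map (fun x => m + x) (List.range (w - m))).map f).sum = 0 := by
    apply List.sum_eq_zero
    intro x hx
    simp only [List.map_map, List.mem_map, List.mem_range, Function.comp_def] at hx
    obtain ⟨k, hk, rfl⟩ := hx
    exact h0 _ (by omega) (by omega)
  rw [this, add_zero]

lemma pv_sum_swap (n w : Nat) (f : Nat → Nat → Int) :
    ((List.range n).map (fun i => ((List.range w).map (f i)).sum)).sum
      = ((List.range w).map (fun j => ((List.range n).map (fun i => f i j)).sum)).sum := by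
  induction n with
  | zero => simp
  | succ n ih =>
    have hrhs : ∀ j, ((List.range (n+1)).map (fun i => f i j)).sum
        = ((List.range n).map (fun i => f i j)).sum + f n j := by
      intro j; rw [List.range_succ, List.map_append, List.sum_append]; simp
    conv_lhs => rw [List.range_succ]
    rw [List.map_append, List.sum_append,
      List.map_congr_left (fun j _ => hrhs j), PySem.List.sum_map_add_int, ← ih]
    simp

lemma pv_sum_getD_map (s : List (List Char)) (f : List Char → Int) :
    ((List.range s.length).map (fun i => f (s.getD i []))).sum = (s.map f).sum := by
  induction s with
  | nil => simp
  | cons r s' ih =>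
    rw [List.length_cons, pv_sum_shift]
    simp only [List.getD_cons_zero, List.getD_cons_succ]
    rw [ih, List.map_cons, List.sum_cons]

theorem how_many_bees_eq (hive : List String) : how_many_bees hive = how_many_bees_alt hive := by
  by_cases h0 : hive = []
  · subst h0; rfl
  · unfold how_many_bees how_many_bees_alt
    rw [if_neg h0, if_neg h0]
    set rows := hive.map String.toList with hrows
    set W := (rows.map List.length).foldl max 0 with hW
    -- B side
    simp only [pv_col_loop]
    rw [pv_foldl_add]
    -- A side
    simp only [pv_body_eq, pv_foldl_add]
    rw [zero_add, show hive.length = rows.length by rw [hrows, List.length_map]]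
    -- per-row rewriting of A's sums
    have hWle : ∀ i, i < rows.length → (rows.getD i []).length ≤ W := by
      intro i hi
      refine (PySem.List.le_foldl_max (rows.map List.length) 0).2 _
        (List.mem_map_of_mem ?_)
      rw [List.getD_eq_getElem rows [] hi]
      exact List.getElem_mem hi
    have hzero : ∀ i, i < rows.length → ∀ k, (rows.getD i []).length ≤ k → k < W →
        pvGc (pvCol rows k) i = 0 := by
      intro i hi k hk _
      have hno : pvOget (pvCol rows k) i = none := by
        rw [pv_oget_col, pvG, List.getElem?_eq_getElem hi]
        rw [List.getD_eq_getElem rows [] hi] at hk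
        simp [List.getElem?_eq_none hk]
      simp [pvGc, pvFwd, pvBwd, hno]
    have hsummand : ∀ i ∈ List.range rows.length,
        ((List.range (rows.getD i []).length).map (fun j => pvCell rows i j)).sum
        = pvBees (rows.getD i []) + ((List.range W).map (fun j => pvGc (pvCol rows j) i)).sum := by
      intro i hi
      rw [List.mem_range] at hi
      rw [List.map_congr_left (fun j _ => pvCell_split rows i j hi),
        PySem.List.sum_map_add_int]
      congr 1
      · rw [show (rows.getD i []).length = ((rows.getD i []).map some).length by
            rw [List.length_map], pv_sum_G, pvBeesO_map_some]
      · exact (pv_sum_range_extend _ _ _ (hWle i hi) (hzero i hi)).symm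
    rw [List.map_congr_left hsummand, PySem.List.sum_map_add_int, pv_sum_getD_map,
      pv_sum_swap]
    congr 1
    apply congrArg
    apply List.map_congr_left
    intro j _
    rw [show rows.length = (pvCol rows j).length by simp [pvCol],
      pv_sum_G, pvSegSpec_eq, List.map_nil, List.nil_append]

-- ===== VERDICT (by name: the statement is the Claim_ definition above) =====
theorem how_many_bees_spec : Claim_equal_how_many_bees := by
  intro hive _
  unfold Spec_how_many_bees
  exact how_many_bees_eq hive
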